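-- pv_equiv track=rewrite | github.com/DuongVinh2004/rag-stack-monorepo | services/worker/app/services/normalizer.py | _render_lines
-- ===== SOURCE A (Python) =====
-- def _render_lines(lines: list[str], kind: str, flags: list[str]) -> str:
--     if kind in {"heading", "qa_pair", "table_row"}:
--         return "\n".join(line for line in lines if line)
--
--     if kind == "list_item":
--         nonempty = [line for line in lines if line]
--         if not nonempty:
--             return ""
--         if len(nonempty) > 1:
--             flags.append("soft_wrap_joins")
--         return " ".join(nonempty)
--
--     segments: list[str] = []
--     current: list[str] = []
--     blank_runs_collapsed = False
--     soft_wrap_joins = 0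
--     for line in lines:
--         if not line:
--             if current:
--                 segments.append(" ".join(current))
--                 current = []
--             if segments and segments[-1]:
--                 segments.append("")
--             else:
--                 blank_runs_collapsed = True
--             continue
--         current.append(line)
--         if len(current) > 1:
--             soft_wrap_joins += 1
--     if current:
--         segments.append(" ".join(current))
--
--     while segments and segments[-1] == "":
--         segments.pop()
--     if soft_wrap_joins:
--         flags.append("soft_wrap_joins")
--     if blank_runs_collapsed:
--         flags.append("blank_runs_collapsed")
--     return "\n\n".join(segment for segment in segments if segment is not None)
-- ===== SOURCE B (Python) =====
-- def _render_lines(lines: list[str], kind: str, flags: list[str]) -> str: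
--     if kind in {"heading", "qa_pair", "table_row"}:
--         return "\n".join(line for line in lines if line)
--
--     # group lines into maximal runs of consecutive non-empty lines
--     runs = []
--     cur = []
--     for line in lines:
--         if line:
--             cur.append(line)
--         elif cur:
--             runs.append(cur)
--             cur = []
--     if cur:
--         runs.append(cur)
--
--     if kind == "list_item":
--         words = [w for run in runs for w in run]
--         if not words:
--             return ""
--         if len(words) > 1:
--             flags.append("soft_wrap_joins")
--         return " ".join(words)
--
--     if any(len(run) > 1 for run in runs):
--         flags.append("soft_wrap_joins")
--     if (lines and not lines[0]) or any(not a and not b for a, b in zip(lines, lines[1:])):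
--         flags.append("blank_runs_collapsed")
--     return "\n\n\n\n".join(" ".join(run) for run in runs)
-- ===== Notes on version B (the rewrite author's own statement) =====
-- stated objective: alternative
-- what changed: B replaces A's single accumulator pass over segments-with-""-sentinels (flush/append/trailing-pop and leftover flag state) by grouping the lines into runs of consecutive non-empty lines, joining each run with ' ' and the runs with the closed-form separator '\n\n\n\n', deriving both flags from closed-form conditions on the lines (a run of length>1; a leading blank or two consecutive blanks).
import Mathlib
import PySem

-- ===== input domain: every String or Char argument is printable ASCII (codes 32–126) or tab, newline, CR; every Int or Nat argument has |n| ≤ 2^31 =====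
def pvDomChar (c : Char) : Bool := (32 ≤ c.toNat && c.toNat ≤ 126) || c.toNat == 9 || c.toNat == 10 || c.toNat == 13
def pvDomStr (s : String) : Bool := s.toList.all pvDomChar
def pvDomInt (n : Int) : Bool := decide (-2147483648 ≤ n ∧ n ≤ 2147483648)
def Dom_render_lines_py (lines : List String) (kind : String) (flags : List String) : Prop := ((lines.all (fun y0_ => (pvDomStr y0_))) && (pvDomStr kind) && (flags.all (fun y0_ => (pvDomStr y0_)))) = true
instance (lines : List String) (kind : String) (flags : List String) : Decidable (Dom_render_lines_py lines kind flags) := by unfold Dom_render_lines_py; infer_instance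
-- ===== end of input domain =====

-- B replaces A's single accumulator pass (segments with "" sentinels, trailing pop, leftover-state
-- flags) by grouping the lines into non-empty runs and joining them with a closed-form separator;
-- both Pythons append the same flags to `flags` in place, but the equivalence proved here is about
-- the RETURN value only.

-- ===== PORT A =====
-- one step of A's `for line in lines` loop; state = (segments, current, blank_runs_collapsed, soft_wrap_joins)
def pvStepA (s : List String × List String × Bool × Nat) (line : String) :
    List String × List String × Bool × Nat :=
  if line = "" then
    let segments := if s.2.1 ≠ [] then s.1 ++ [PySem.Str.join " " s.2.1] else s.1
    let current : List String := if s.2.1 ≠ [] then [] else s.2.1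
    if segments ≠ [] ∧ segments.getLast?.getD "" ≠ "" then
      (segments ++ [""], current, s.2.2.1, s.2.2.2)
    else
      (segments, current, true, s.2.2.2)
  else
    let current := s.2.1 ++ [line]
    (s.1, current, s.2.2.1, if current.length > 1 then s.2.2.2 + 1 else s.2.2.2)

-- port of `while segments and segments[-1] == "": segments.pop()` (drop trailing empty strings)
def pvPopTrailing (xs : List String) : List String :=
  (xs.reverse.dropWhile (fun s => s = "")).reverse

def render_lines_py (lines : List String) (kind : String) (flags : List String) : String :=
  if kind = "heading" ∨ kind = "qa_pair" ∨ kind = "table_row" then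
    PySem.Str.join "\n" (lines.filter (fun l => l ≠ ""))
  else if kind = "list_item" then
    let nonempty := lines.filter (fun l => l ≠ "")
    if nonempty = [] then "" else PySem.Str.join " " nonempty
  else
    let st := lines.foldl pvStepA ([], [], false, 0)
    let segments := if st.2.1 ≠ [] then st.1 ++ [PySem.Str.join " " st.2.1] else st.1
    -- `if segment is not None` keeps every element
    PySem.Str.join "\n\n" (pvPopTrailing segments)

-- ===== PORT B =====
-- one step of B's grouping loop; state = (runs, cur)
def pvStepB (s : List (List String) × List String) (line : String) :
    List (List String) × List String :=
  if line ≠ "" then (s.1, s.2 ++ [line])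
  else if s.2 ≠ [] then (s.1 ++ [s.2], []) else s

def pvRunsFinish (s : List (List String) × List String) : List (List String) :=
  if s.2 ≠ [] then s.1 ++ [s.2] else s.1

def pvRuns (lines : List String) : List (List String) :=
  pvRunsFinish (lines.foldl pvStepB ([], []))

def render_lines_py_alt (lines : List String) (kind : String) (flags : List String) : String :=
  if kind = "heading" ∨ kind = "qa_pair" ∨ kind = "table_row" then
    PySem.Str.join "\n" (lines.filter (fun l => l ≠ ""))
  else
    let runs := pvRuns lines
    if kind = "list_item" then
      let words := runs.flatMap id
      if words = [] then "" else PySem.Str.join " " words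
    else
      PySem.Str.join "\n\n\n\n" (runs.map (fun r => PySem.Str.join " " r))

-- ===== PRECONDITION & SPEC =====
def Spec_render_lines_py (lines : List String) (kind : String) (flags : List String) (out : String) : Prop := out = render_lines_py_alt lines kind flags
instance (lines : List String) (kind : String) (flags : List String) (out : String) : Decidable (Spec_render_lines_py lines kind flags out) := by unfold Spec_render_lines_py; infer_instance

-- ===== CLAIM (what is proved, stated in full; the proofs are below) =====
def Claim_equal_render_lines_py : Prop := ∀ (lines : List String) (kind : String) (flags : List String), Dom_render_lines_py lines kind flags → Spec_render_lines_py lines kind flags (render_lines_py lines kind flags)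

-- ===== LEMMAS AND PROOFS =====

-- join at the String level, cons-cons step
theorem str_join_cons_cons (sep a b : String) (rest : List String) :
    PySem.Str.join sep (a :: b :: rest) = a ++ sep ++ PySem.Str.join sep (b :: rest) := by
  apply String.toList_inj.mp
  simp [PySem.Str.toList_join, PySem.Chars.join_cons_cons]

theorem str_join_nil (sep : String) : PySem.Str.join sep [] = "" := by
  apply String.toList_inj.mp
  simp [PySem.Str.toList_join, PySem.Chars.join_nil]

theorem str_join_singleton (sep p : String) : PySem.Str.join sep [p] = p := by
  apply String.toList_inj.mp
  simp [PySem.Str.toList_join, PySem.Chars.join_singleton]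

theorem join_space_ne_empty (r : List String) (hne : r ≠ []) (h : ∀ x ∈ r, x ≠ "") :
    PySem.Str.join " " r ≠ "" := by
  match r with
  | [] => exact absurd rfl hne
  | [x] =>
      rw [str_join_singleton]
      exact h x (by simp)
  | x :: y :: rest =>
      rw [str_join_cons_cons]
      intro hc
      have : (x ++ " " ++ PySem.Str.join " " (y :: rest)).toList = [] := by simp [hc]
      simp [String.toList_append] at this

theorem popTrailing_append_ne (l : List String) (P : String) (h : P ≠ "") :
    pvPopTrailing (l ++ [P]) = l ++ [P] := by
  simp [pvPopTrailing, h]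

theorem popTrailing_append_of_ne_nil (l1 l2 : List String) (h : pvPopTrailing l2 ≠ []) :
    pvPopTrailing (l1 ++ l2) = l1 ++ pvPopTrailing l2 := by
  have h2 : l2.reverse.dropWhile (fun s => s = "") ≠ [] := by
    intro hc; apply h; simp [pvPopTrailing, hc]
  simp [pvPopTrailing, List.dropWhile_append, List.isEmpty_iff, h2]

-- the interleaving used only in proofs: [p1,"",p2,"",…] without the trailing ""
def pvSepIl : List String → List String
  | [] => []
  | [p] => [p]
  | p :: q :: rest => p :: "" :: pvSepIl (q :: rest)

theorem sepIl_ne_nil (p : String) (ps : List String) : pvSepIl (p :: ps) ≠ [] := by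
  cases ps <;> simp [pvSepIl]

theorem popTrailing_flatMap (ps : List String) (h : ∀ p ∈ ps, p ≠ "") :
    pvPopTrailing (ps.flatMap (fun p => [p, ""])) = pvSepIl ps := by
  induction ps with
  | nil => simp [pvPopTrailing, pvSepIl]
  | cons p ps ih =>
      have hp : p ≠ "" := h p (by simp)
      cases ps with
      | nil =>
          simp [pvSepIl, pvPopTrailing, List.dropWhile, hp]
      | cons q qs =>
          have ih' := ih (fun x hx => h x (by simp [hx]))
          have hne : pvPopTrailing ((q :: qs).flatMap (fun p => [p, ""])) ≠ [] := by
            rw [ih']; exact sepIl_ne_nil q qs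
          have : (p :: q :: qs).flatMap (fun p => [p, ""]) =
              [p, ""] ++ (q :: qs).flatMap (fun p => [p, ""]) := by simp
          rw [this, popTrailing_append_of_ne_nil _ _ hne, ih']
          simp [pvSepIl]

theorem join_sepIl (ps : List String) :
    PySem.Str.join "\n\n" (pvSepIl ps) = PySem.Str.join "\n\n\n\n" ps := by
  induction ps with
  | nil => simp [pvSepIl, str_join_nil]
  | cons p ps ih =>
      cases ps with
      | nil => simp [pvSepIl, str_join_singleton]
      | cons q qs =>
          rw [show pvSepIl (p :: q :: qs) = p :: "" :: pvSepIl (q :: qs) from rfl]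
          have hne := sepIl_ne_nil q qs
          obtain ⟨r, rest, hr⟩ : ∃ r rest, pvSepIl (q :: qs) = r :: rest := by
            cases hs : pvSepIl (q :: qs) with
            | nil => exact absurd hs hne
            | cons r rest => exact ⟨r, rest, rfl⟩
          rw [hr, str_join_cons_cons, str_join_cons_cons, ← hr, ih, str_join_cons_cons]
          apply String.toList_inj.mp
          simp [String.toList_append]

theorem join_flatMap_append (ps : List String) (P : String) :
    PySem.Str.join "\n\n" (ps.flatMap (fun p => [p, ""]) ++ [P]) =
    PySem.Str.join "\n\n\n\n" (ps ++ [P]) := by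
  induction ps with
  | nil => simp [str_join_singleton]
  | cons p ps ih =>
      have h1 : (p :: ps).flatMap (fun p => [p, ""]) ++ [P] =
          p :: "" :: (ps.flatMap (fun p => [p, ""]) ++ [P]) := by simp
      rw [h1]
      obtain ⟨r, rest, hr⟩ : ∃ r rest, ps.flatMap (fun p => [p, ""]) ++ [P] = r :: rest := by
        cases hs : ps.flatMap (fun p => [p, ""]) ++ [P] with
        | nil => simp at hs
        | cons r rest => exact ⟨r, rest, rfl⟩
      rw [hr, str_join_cons_cons, str_join_cons_cons, ← hr, ih]
      obtain ⟨r', rest', hr'⟩ : ∃ r' rest', ps ++ [P] = r' :: rest' := by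
        cases hs : ps ++ [P] with
        | nil => simp at hs
        | cons r' rest' => exact ⟨r', rest', rfl⟩
      simp only [List.cons_append]
      rw [hr', str_join_cons_cons]
      apply String.toList_inj.mp
      simp [String.toList_append]

theorem getLast_flatMap (ps : List String) (h : ps ≠ []) :
    (ps.flatMap (fun p => [p, ""])).getLast?.getD "" = "" := by
  induction ps with
  | nil => exact absurd rfl h
  | cons p ps ih =>
      cases ps with
      | nil => simp
      | cons q qs =>
          have := ih (by simp)
          simpa [List.getLast?_append, List.flatMap_cons] using this

-- A's finishing computation from an arbitrary loop state
def pvFinishA (st : List String × List String × Bool × Nat) : String :=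
  PySem.Str.join "\n\n"
    (pvPopTrailing (if st.2.1 ≠ [] then st.1 ++ [PySem.Str.join " " st.2.1] else st.1))

-- the main simulation: A's loop from a state whose segments are B's runs-so-far (joined,
-- interleaved with "" sentinels) computes B's closed-form join
theorem main_sim (lines : List String) (rs : List (List String)) (cur : List String)
    (c : Bool) (s : Nat)
    (hrs : ∀ r ∈ rs, r ≠ [] ∧ ∀ x ∈ r, x ≠ "") (hcur : ∀ x ∈ cur, x ≠ "") :
    pvFinishA (lines.foldl pvStepA
        ((rs.map (fun r => PySem.Str.join " " r)).flatMap (fun p => [p, ""]), cur, c, s)) =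
    PySem.Str.join "\n\n\n\n"
      ((pvRunsFinish (lines.foldl pvStepB (rs, cur))).map (fun r => PySem.Str.join " " r)) := by
  induction lines generalizing rs cur c s with
  | nil =>
      simp only [List.foldl_nil, pvFinishA, pvRunsFinish]
      by_cases hc : cur = []
      · subst hc
        simp only [ne_eq, not_true_eq_false, reduceIte]
        rw [popTrailing_flatMap _ (by
          intro p hp
          simp only [List.mem_map] at hp
          obtain ⟨r, hr, hpr⟩ := hp
          exact hpr ▸ join_space_ne_empty r (hrs r hr).1 (hrs r hr).2), join_sepIl]
      · have hP : PySem.Str.join " " cur ≠ "" := join_space_ne_empty cur hc hcur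
        simp only [ne_eq, hc, not_false_eq_true, if_pos]
        rw [popTrailing_append_ne _ _ hP, join_flatMap_append]
        simp
  | cons line lines ih =>
      by_cases hl : line = ""
      · subst hl
        by_cases hc : cur = []
        · subst hc
          have hF : ¬(((rs.map (fun r => PySem.Str.join " " r)).flatMap (fun p => [p, ""])) ≠ [] ∧
              ((rs.map (fun r => PySem.Str.join " " r)).flatMap (fun p => [p, ""])).getLast?.getD "" ≠ "") := by
            cases rs with
            | nil => simp
            | cons r rs' =>
                have hlast : (((r :: rs').map (fun r => PySem.Str.join " " r)).flatMap
                    (fun p => [p, ""])).getLast?.getD "" = "" :=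
                  getLast_flatMap _ (by simp)
                intro hcontra
                exact hcontra.2 hlast
          have hstepA : pvStepA ((rs.map (fun r => PySem.Str.join " " r)).flatMap (fun p => [p, ""]), [], c, s) ""
              = ((rs.map (fun r => PySem.Str.join " " r)).flatMap (fun p => [p, ""]), [], true, s) := by
            simp only [pvStepA, ne_eq, not_true_eq_false, reduceIte]
            rw [if_neg]
            simpa using hF
          have hstepB : pvStepB (rs, ([] : List String)) "" = (rs, []) := by
            simp [pvStepB]
          rw [List.foldl_cons, List.foldl_cons, hstepA, hstepB]
          exact ih rs [] true s hrs (by simp)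
        · have hP : PySem.Str.join " " cur ≠ "" := join_space_ne_empty cur hc hcur
          have hstepA : pvStepA ((rs.map (fun r => PySem.Str.join " " r)).flatMap (fun p => [p, ""]), cur, c, s) ""
              = (((rs ++ [cur]).map (fun r => PySem.Str.join " " r)).flatMap (fun p => [p, ""]), [], c, s) := by
            simp only [pvStepA, ne_eq, hc, not_false_eq_true, if_pos]
            rw [if_pos]
            · simp
            · constructor
              · simp
              · rw [List.getLast?_append]
                simpa using hP
          have hstepB : pvStepB (rs, cur) "" = (rs ++ [cur], []) := by
            simp [pvStepB, hc]
          rw [List.foldl_cons, List.foldl_cons, hstepA, hstepB]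
          exact ih (rs ++ [cur]) [] c s
            (by
              intro r hr
              rcases List.mem_append.mp hr with h' | h'
              · exact hrs r h'
              · simp only [List.mem_singleton] at h'
                exact h' ▸ ⟨hc, hcur⟩)
            (by simp)
      · have hstepA : pvStepA ((rs.map (fun r => PySem.Str.join " " r)).flatMap (fun p => [p, ""]), cur, c, s) line
            = ((rs.map (fun r => PySem.Str.join " " r)).flatMap (fun p => [p, ""]), cur ++ [line], c,
                if (cur ++ [line]).length > 1 then s + 1 else s) := by
          simp [pvStepA, hl]
        have hstepB : pvStepB (rs, cur) line = (rs, cur ++ [line]) := by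
          simp [pvStepB, hl]
        rw [List.foldl_cons, List.foldl_cons, hstepA, hstepB]
        exact ih rs (cur ++ [line]) c _ hrs
          (by
            intro x hx
            rcases List.mem_append.mp hx with h' | h'
            · exact hcur x h'
            · simp only [List.mem_singleton] at h'
              exact h' ▸ hl)

-- the runs flattened back give exactly the non-empty lines
theorem flatten_runs (lines : List String) (rs : List (List String)) (cur : List String) :
    (pvRunsFinish (lines.foldl pvStepB (rs, cur))).flatMap id =
    rs.flatMap id ++ cur ++ lines.filter (fun l => l ≠ "") := by
  induction lines generalizing rs cur with
  | nil =>
      by_cases hc : cur = [] <;> simp [pvRunsFinish, hc]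
  | cons line lines ih =>
      by_cases hl : line = ""
      · subst hl
        by_cases hc : cur = []
        · subst hc
          simp only [List.foldl_cons, pvStepB, ne_eq, not_true_eq_false, reduceIte]
          rw [ih rs []]
          simp
        · simp only [List.foldl_cons, pvStepB, ne_eq, not_true_eq_false, hc, not_false_eq_true,
            reduceIte]
          rw [ih (rs ++ [cur]) []]
          simp
      · simp only [List.foldl_cons, pvStepB, ne_eq, hl, not_false_eq_true, reduceIte]
        rw [ih rs (cur ++ [line])]
        simp [hl]

-- ===== VERDICT (by name: the statement is the Claim_ definition above) =====
theorem render_lines_py_spec : Claim_equal_render_lines_py := by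
  intro lines kind flags _
  unfold Spec_render_lines_py render_lines_py render_lines_py_alt
  by_cases hk : kind = "heading" ∨ kind = "qa_pair" ∨ kind = "table_row"
  · simp [hk]
  · simp only [hk, reduceIte]
    by_cases hli : kind = "list_item"
    · have hw : (pvRuns lines).flatMap id = lines.filter (fun l => l ≠ "") := by
        have := flatten_runs lines [] []
        simpa [pvRuns] using this
      simp [hli, hw]
    · simp only [hli, reduceIte]
      have := main_sim lines [] [] false 0 (by simp) (by simp)
      simpa [pvFinishA, pvRuns] using this
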